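-- pv_equiv track=rewrite | github.com/noah-yared/lisp-interpreter | src/interpreter.py | parse_semicolons
-- ===== SOURCE A (Python) =====
-- def parse_semicolons(source: str) -> list[str]:
--     """
--     Removes comments from source code.
--     Args: source - input string
--     Returns: list of code segments without comments
--     """
--     scs_removed, curr = [], 0
--     while curr < len(source):
--         tok_end = source.find(";", curr)
--         if tok_end == -1:  # no more semicolons to parse out
--             scs_removed.append(source[curr:])
--             return scs_removed
--         scs_removed.append(source[curr:tok_end])
--         eol = source.find("\n", tok_end)
--         if eol == -1:  # on last line
--             return scs_removed
--         curr = eol + 1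
--     return scs_removed
-- ===== SOURCE B (Python) =====
-- def parse_semicolons(source: str) -> list[str]:
--     """
--     Removes comments from source code.
--     Args: source - input string
--     Returns: list of code segments without comments
--     """
--     segments = []
--     buffer = ""
--     in_comment = False
--     for ch in source:
--         if not in_comment and ch == ";":
--             segments.append(buffer)
--             buffer = ""
--             in_comment = True
--         elif in_comment and ch == "\n":
--             in_comment = False
--         elif not in_comment:
--             buffer += ch
--     if not in_comment and buffer != "":
--         segments.append(buffer)
--     return segments
-- ===== Notes on version B (the rewrite author's own statement) =====
-- stated objective: simpler
-- what changed: Replaces A's find/slice jumping loop (repeated source.find calls and index arithmetic) with a single char-by-char scan carrying a buffer and an in_comment flag.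
import Mathlib
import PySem

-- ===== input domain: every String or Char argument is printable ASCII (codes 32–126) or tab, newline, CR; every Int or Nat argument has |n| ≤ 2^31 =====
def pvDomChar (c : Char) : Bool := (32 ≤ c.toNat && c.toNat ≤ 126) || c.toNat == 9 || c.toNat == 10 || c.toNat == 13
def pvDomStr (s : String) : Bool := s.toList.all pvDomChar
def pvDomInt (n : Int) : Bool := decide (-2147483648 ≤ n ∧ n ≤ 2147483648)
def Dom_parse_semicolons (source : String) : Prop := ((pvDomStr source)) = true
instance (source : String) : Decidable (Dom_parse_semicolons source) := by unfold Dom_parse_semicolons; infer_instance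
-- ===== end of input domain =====

-- B replaces A's find/slice jumping loop with a single char-by-char scan (buffer + in_comment flag); same O(n) cost, simpler.

-- ===== PORT A =====
-- A's while-loop transliterated on the remaining suffix of the source (rest = source[curr:]):
-- find the next ';', emit the slice before it, find the following '\n' from there, jump past it.
-- `fuel` only bounds the iteration count to make the loop total (length + 1 always suffices).
def pvALoop (fuel : Nat) (rest : List Char) (acc : List String) : List String :=
  match fuel with
  | 0 => acc
  | fuel + 1 =>
    if rest.isEmpty then acc                                      -- while curr < len(source)
    else
      let tokEnd := PySem.Chars.find rest [';']                   -- source.find(";", curr)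
      if tokEnd = -1 then
        acc ++ [String.ofList (PySem.List.slice rest none none)]      -- append source[curr:]; return
      else
        let acc' := acc ++ [String.ofList (PySem.List.slice rest none (some tokEnd))]  -- source[curr:tok_end]
        let eol := PySem.Chars.findFrom rest ['\n'] tokEnd none   -- source.find("\n", tok_end)
        if eol = -1 then acc'                                     -- on last line: return
        else pvALoop fuel (PySem.List.slice rest (some (eol + 1)) none) acc'  -- curr = eol + 1

def parse_semicolons (source : String) : List String :=
  pvALoop (source.toList.length + 1) source.toList []

-- ===== PORT B =====
-- one scan step of Source B's for-loop; state = (segments, buffer, in_comment)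
def pvStep (st : List String × List Char × Bool) (c : Char) : List String × List Char × Bool :=
  match st with
  | (segs, buf, inComment) =>
    if !inComment && c == ';' then (segs ++ [String.ofList buf], [], true)
    else if inComment && c == '\n' then (segs, buf, false)
    else if !inComment then (segs, buf ++ [c], inComment)
    else (segs, buf, inComment)

def parse_semicolons_alt (source : String) : List String :=
  let st := source.toList.foldl pvStep ([], [], false)
  if !st.2.2 && !st.2.1.isEmpty then st.1 ++ [String.ofList st.2.1] else st.1

-- ===== PRECONDITION & SPEC =====
def Spec_parse_semicolons (source : String) (out : List String) : Prop := out = parse_semicolons_alt source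
instance (source : String) (out : List String) : Decidable (Spec_parse_semicolons source out) := by unfold Spec_parse_semicolons; infer_instance

-- ===== CLAIM (what is proved, stated in full; the proofs are below) =====
def Claim_equal_parse_semicolons : Prop := ∀ (source : String), Dom_parse_semicolons source → Spec_parse_semicolons source (parse_semicolons source)

-- ===== LEMMAS AND PROOFS =====

-- reference scan: what both ports compute, by structural recursion on the characters
def pvRun : List Char → List Char → Bool → List String
  | [], buf, inC => if !inC && !buf.isEmpty then [String.ofList buf] else []
  | c :: cs, buf, inC =>
    if !inC && c == ';' then String.ofList buf :: pvRun cs [] true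
    else if inC && c == '\n' then pvRun cs buf false
    else if !inC then pvRun cs (buf ++ [c]) inC
    else pvRun cs buf inC

-- first-occurrence decomposition
lemma pv_first_split {c : Char} {l : List Char} (h : c ∈ l) :
    ∃ pre post, l = pre ++ c :: post ∧ c ∉ pre := by
  induction l with
  | nil => cases h
  | cons a t ih =>
    by_cases hac : a = c
    · exact ⟨[], t, by simp [hac], by simp⟩
    · have ht : c ∈ t := (List.mem_cons.mp h).resolve_left (fun h' => hac h'.symm)
      obtain ⟨pre, post, rfl, hpre⟩ := ih ht
      refine ⟨a :: pre, post, rfl, fun hm => ?_⟩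
      rcases List.mem_cons.mp hm with h' | h'
      · exact hac h'.symm
      · exact hpre h'

lemma pv_find_neg {c : Char} {l : List Char} (h : c ∉ l) :
    PySem.Chars.find l [c] = -1 := by
  rw [PySem.Chars.find_eq_neg_one_iff]
  rw [List.singleton_infix_iff]
  exact h

lemma pv_find_pos {c : Char} (pre post : List Char) (h : c ∉ pre) :
    PySem.Chars.find (pre ++ c :: post) [c] = (pre.length : Int) := by
  set s := pre ++ c :: post with hs
  have hmem : c ∈ s := by simp [hs]
  have hinf : [c] <:+: s := (List.singleton_infix_iff c s).mpr hmem
  have hnn : 0 ≤ PySem.Chars.find s [c] := (PySem.Chars.find_nonneg_iff s [c]).mpr hinf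
  obtain ⟨h1, h2⟩ := PySem.Chars.find_spec (s := s) (sub := [c]) hnn
  set k := (PySem.Chars.find s [c]).toNat with hk
  have hple : [c] <+: s.drop pre.length := by
    rw [hs, List.drop_left]
    exact ⟨post, rfl⟩
  have hle : k ≤ pre.length := by
    by_contra hlt
    exact h2 pre.length (by omega) hple
  have hkp : k = pre.length := by
    rcases lt_or_eq_of_le hle with hlt | he
    · exfalso
      obtain ⟨u, hu⟩ := h1
      have : s[k]? = some c := by
        have : (s.drop k)[0]? = some c := by rw [← hu]; simp
        simpa using this
      have hpk : pre[k]? = some c := by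
        rw [hs] at this
        rwa [List.getElem?_append_left hlt] at this
      exact h (List.mem_of_getElem? hpk)
    · exact he
  omega

-- B's fold equals the reference scan
lemma pv_B_run (cs : List Char) : ∀ (segs : List String) (buf : List Char) (inC : Bool),
    (let st := List.foldl pvStep (segs, buf, inC) cs
     if !st.2.2 && !st.2.1.isEmpty then st.1 ++ [String.ofList st.2.1] else st.1)
      = segs ++ pvRun cs buf inC := by
  induction cs with
  | nil =>
    intro segs buf inC
    simp only [List.foldl_nil, pvRun]
    split_ifs <;> simp_all
  | cons c cs ih =>
    intro segs buf inC
    simp only [List.foldl_cons, pvStep]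
    by_cases h1 : (!inC && c == ';') = true
    · rw [if_pos h1, ih]
      simp [pvRun, h1]
    · rw [if_neg h1]
      by_cases h2 : (inC && c == '\n') = true
      · rw [if_pos h2, ih]
        simp [pvRun, h1, h2]
      · rw [if_neg h2]
        by_cases h3 : (!inC) = true
        · have hc : (c == ';') = false := by
            revert h1; cases hb : (c == ';') <;> simp [h3]
          rw [if_pos h3, ih]
          simp [pvRun, h2, h3, hc]
        · rw [if_neg h3, ih]
          simp [pvRun, h2, h3]

-- the reference scan on a semicolon-free code segment
lemma pv_run_noSemi {l : List Char} (h : (';' : Char) ∉ l) : ∀ buf : List Char,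
    pvRun l buf false = if (buf ++ l).isEmpty then [] else [String.ofList (buf ++ l)] := by
  induction l with
  | nil => intro buf; simp [pvRun]
  | cons c cs ih =>
    intro buf
    have hc : c ≠ ';' := fun hc => h (hc ▸ List.mem_cons_self)
    have hcs : (';' : Char) ∉ cs := fun hm => h (List.mem_cons_of_mem _ hm)
    simp only [pvRun]
    rw [if_neg (by simp [hc]), if_neg (by simp), if_pos (by simp)]
    rw [ih hcs (buf ++ [c])]
    simp

-- the reference scan up to the first semicolon
lemma pv_run_semi {pre : List Char} (h : (';' : Char) ∉ pre) : ∀ (buf post : List Char),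
    pvRun (pre ++ ';' :: post) buf false = String.ofList (buf ++ pre) :: pvRun post [] true := by
  induction pre with
  | nil => intro buf post; simp [pvRun]
  | cons c cs ih =>
    intro buf post
    have hc : c ≠ ';' := fun hc => h (hc ▸ List.mem_cons_self)
    have hcs : (';' : Char) ∉ cs := fun hm => h (List.mem_cons_of_mem _ hm)
    simp only [List.cons_append, pvRun]
    rw [if_neg (by simp [hc]), if_neg (by simp), if_pos (by simp)]
    rw [ih hcs (buf ++ [c]) post]
    simp

-- the reference scan in a comment with no newline left: nothing more is emitted
lemma pv_run_noNl {l : List Char} (h : ('\n' : Char) ∉ l) : ∀ buf : List Char,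
    pvRun l buf true = [] := by
  induction l with
  | nil => intro buf; simp [pvRun]
  | cons c cs ih =>
    intro buf
    have hc : c ≠ '\n' := fun hc => h (hc ▸ List.mem_cons_self)
    have hcs : ('\n' : Char) ∉ cs := fun hm => h (List.mem_cons_of_mem _ hm)
    simp [pvRun, hc, ih hcs]

-- the reference scan skips a comment up to and including its newline
lemma pv_run_nl {mid : List Char} (h : ('\n' : Char) ∉ mid) : ∀ (buf rest : List Char),
    pvRun (mid ++ '\n' :: rest) buf true = pvRun rest buf false := by
  induction mid with
  | nil => intro buf rest; simp [pvRun]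
  | cons c cs ih =>
    intro buf rest
    have hc : c ≠ '\n' := fun hc => h (hc ▸ List.mem_cons_self)
    have hcs : ('\n' : Char) ∉ cs := fun hm => h (List.mem_cons_of_mem _ hm)
    simp [pvRun, hc, ih hcs]

-- A's loop equals the reference scan
lemma pv_A_run : ∀ (fuel : Nat) (rest : List Char) (acc : List String), rest.length < fuel →
    pvALoop fuel rest acc = acc ++ pvRun rest [] false := by
  intro fuel
  induction fuel with
  | zero => intro rest acc h; omega
  | succ fuel ih =>
    intro rest acc hlen
    rw [pvALoop]
    by_cases hre : rest = []
    · simp [hre, pvRun]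
    · simp only [List.isEmpty_iff, hre, if_false]
      by_cases hsemi : (';' : Char) ∈ rest
      · obtain ⟨pre, post, rfl, hpre⟩ := pv_first_split hsemi
        rw [pv_find_pos pre post hpre]
        have hnneg : ¬((pre.length : Int) = -1) := by omega
        rw [if_neg hnneg]
        rw [PySem.List.slice_to_natCast]
        rw [List.take_left]
        have hk : pre.length ≤ (pre ++ ';' :: post).length := by simp
        rw [PySem.Chars.findFrom_natCast _ _ _ hk]
        rw [List.drop_left]
        by_cases hnl : ('\n' : Char) ∈ post
        · obtain ⟨mid, rest', rfl, hmid⟩ := pv_first_split hnl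
          have hf : PySem.Chars.find (';' :: (mid ++ '\n' :: rest')) ['\n']
              = ((';' :: mid).length : Int) := by
            have hns : ('\n' : Char) ∉ (';' :: mid) := by
              intro hm
              rcases List.mem_cons.mp hm with h' | h'
              · exact (by decide : ('\n' : Char) ≠ ';') h'
              · exact hmid h'
            have := pv_find_pos (c := '\n') (';' :: mid) rest' hns
            simpa using this
          rw [hf]
          have hfne : ¬(((';' :: mid).length : Int) = -1) := by
            simp only [List.length_cons]; omega
          rw [if_neg hfne, if_neg (by simp only [List.length_cons]; push_cast; omega)]
          have harg : PySem.List.slice (pre ++ ';' :: (mid ++ '\n' :: rest'))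
              (some ((pre.length : Int) + ((';' :: mid).length : Int) + 1)) none = rest' := by
            have h0 : (0:Int) ≤ (pre.length : Int) + ((';' :: mid).length : Int) + 1 := by
              simp only [List.length_cons]; push_cast; omega
            rw [PySem.List.slice_from _ h0]
            have : ((pre.length : Int) + ((';' :: mid).length : Int) + 1).toNat
                = pre.length + mid.length + 2 := by
              simp only [List.length_cons]; push_cast; omega
            rw [this]
            have : pre ++ ';' :: (mid ++ '\n' :: rest')
                = (pre ++ ';' :: mid ++ ['\n']) ++ rest' := by simp
            rw [this]
            have hlen2 : (pre ++ ';' :: mid ++ ['\n']).length = pre.length + mid.length + 2 := by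
              simp; omega
            rw [← hlen2, List.drop_left]
          rw [harg]
          rw [ih rest' _ (by
            have : (pre ++ ';' :: (mid ++ '\n' :: rest')).length
                = rest'.length + (pre.length + mid.length + 2) := by simp; omega
            omega)]
          rw [pv_run_semi hpre, pv_run_nl hmid]
          simp
        · have hns : ('\n' : Char) ∉ (';' :: post) := by
            intro hm
            rcases List.mem_cons.mp hm with h' | h'
            · exact (by decide : ('\n' : Char) ≠ ';') h'
            · exact hnl h'
          have hfnl : PySem.Chars.find (';' :: post) ['\n'] = -1 := pv_find_neg hns
          rw [hfnl, pv_run_semi hpre, pv_run_noNl hnl]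
          simp
      · rw [pv_find_neg hsemi]
        simp only [PySem.List.slice_none_none]
        rw [pv_run_noSemi hsemi]
        simp [hre]

-- ===== VERDICT (by name: the statement is the Claim_ definition above) =====
theorem parse_semicolons_spec : Claim_equal_parse_semicolons := by
  intro source _
  unfold Spec_parse_semicolons parse_semicolons parse_semicolons_alt
  rw [pv_A_run _ _ _ (Nat.lt_succ_self _)]
  rw [pv_B_run source.toList [] [] false]
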